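-- pv_equiv track=rewrite | github.com/pabloschwarzenberg/grader | tema4_ej3/tema4_ej3_0e7c89eb06e78fcf1af842525bdfd3a8.py | jerigonzo
-- ===== SOURCE A (Python) =====
-- def jerigonzo(string):
--
--     temp = []
--     vocales = ['a', 'e', 'i', 'o', 'u']
--     for x in string:
--         temp.append(x)
--         if x in vocales:
--             temp.append('p')
--             temp.append(x)
--
--     string = "".join(temp)
--     return string
-- ===== SOURCE B (Python) =====
-- def jerigonzo(string):
--     for v in "aeiou":
--         string = string.replace(v, v + "p" + v)
--     return string
-- ===== Notes on version B (the rewrite author's own statement) =====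
-- stated objective: idiomatic
-- what changed: Replaces the manual char-by-char accumulator loop with five passes of the library str.replace, one per vowel (v -> v+'p'+v); correct because replace is non-overlapping and inserted characters never trigger a later pass.
import Mathlib
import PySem

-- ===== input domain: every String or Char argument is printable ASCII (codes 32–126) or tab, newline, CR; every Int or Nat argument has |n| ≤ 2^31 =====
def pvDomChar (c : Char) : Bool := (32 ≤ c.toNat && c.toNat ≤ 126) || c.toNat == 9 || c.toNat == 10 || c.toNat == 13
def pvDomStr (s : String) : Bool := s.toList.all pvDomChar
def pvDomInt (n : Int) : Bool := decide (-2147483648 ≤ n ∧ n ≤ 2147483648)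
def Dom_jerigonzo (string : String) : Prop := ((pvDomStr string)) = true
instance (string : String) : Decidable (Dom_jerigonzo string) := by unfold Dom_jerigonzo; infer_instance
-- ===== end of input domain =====

-- B replaces A's manual char-by-char accumulator loop with five str.replace passes (one per vowel), more idiomatic, same O(n) cost.

-- ===== PORT A =====
def jerigonzo (string : String) : String :=
  let vocales : List Char := ['a', 'e', 'i', 'o', 'u']
  let temp : List Char :=
    string.toList.foldl (fun temp x =>
      let temp := temp ++ [x]
      if x ∈ vocales then (temp ++ ['p']) ++ [x] else temp) []
  String.ofList temp

-- ===== PORT B =====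
def jerigonzo_alt (string : String) : String :=
  "aeiou".toList.foldl
    (fun s v => PySem.Str.replace s (String.ofList [v]) ((String.ofList [v] ++ "p") ++ String.ofList [v]))
    string

-- ===== PRECONDITION & SPEC =====
def Spec_jerigonzo (string : String) (out : String) : Prop := out = jerigonzo_alt string
instance (string : String) (out : String) : Decidable (Spec_jerigonzo string out) := by unfold Spec_jerigonzo; infer_instance

-- ===== CLAIM (what is proved, stated in full; the proofs are below) =====
def Claim_equal_jerigonzo : Prop := ∀ (string : String), Dom_jerigonzo string → Spec_jerigonzo string (jerigonzo string)

-- ===== LEMMAS AND PROOFS =====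

-- per-character expansion shared by both characterisations
def pvG (x : Char) : List Char := if x ∈ (['a','e','i','o','u'] : List Char) then [x, 'p', x] else [x]

-- single-vowel expansion performed by one replace pass
def pvE (v : Char) (l : List Char) : List Char := l.flatMap (fun c => if c = v then [v, 'p', v] else [c])

-- replace.go with a single-char pattern and enough fuel is exactly the single-vowel expansion
theorem pv_go_eq (v : Char) (new : List Char) :
    ∀ (fuel : Nat) (l acc : List Char), l.length ≤ fuel →
      PySem.Chars.replace.go [v] new fuel l acc
        = acc.reverse ++ l.flatMap (fun c => if c = v then new else [c]) := by
  intro fuel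
  induction fuel with
  | zero =>
    intro l acc h
    have : l = [] := List.length_eq_zero_iff.mp (Nat.le_zero.mp h)
    subst this
    simp [PySem.Chars.replace.go]
  | succ n ih =>
    intro l acc h
    cases l with
    | nil => simp [PySem.Chars.replace.go]
    | cons c t =>
      by_cases hc : c = v
      · subst hc
        have hp : ([c].isPrefixOf (c :: t)) = true := by
          simp [List.isPrefixOf]
        simp only [PySem.Chars.replace.go, hp, if_pos]
        rw [ih _ _ (by simpa using Nat.le_of_succ_le_succ h)]
        simp
      · have hp : ([v].isPrefixOf (c :: t)) = false := by
          simp [List.isPrefixOf]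
          exact fun h => hc h.symm
        simp only [PySem.Chars.replace.go, hp]
        rw [if_neg (by simp [hc]), ih _ _ (by simpa using Nat.le_of_succ_le_succ h)]
        simp [hc]

theorem pv_replace_single (v : Char) (l : List Char) :
    PySem.Chars.replace l [v] [v, 'p', v] = pvE v l := by
  unfold PySem.Chars.replace pvE
  simp [pv_go_eq v [v, 'p', v] l.length l [] le_rfl]

-- the composite of the five single-vowel expansions
def pvC (l : List Char) : List Char := pvE 'u' (pvE 'o' (pvE 'i' (pvE 'e' (pvE 'a' l))))

theorem pvC_append (a b : List Char) : pvC (a ++ b) = pvC a ++ pvC b := by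
  simp [pvC, pvE, List.flatMap_append]

theorem pvC_single (c : Char) : pvC [c] = pvG c := by
  by_cases h1 : c = 'a'; · subst h1; decide
  by_cases h2 : c = 'e'; · subst h2; decide
  by_cases h3 : c = 'i'; · subst h3; decide
  by_cases h4 : c = 'o'; · subst h4; decide
  by_cases h5 : c = 'u'; · subst h5; decide
  simp [pvC, pvE, pvG, h1, h2, h3, h4, h5]

theorem pvC_eq (l : List Char) : pvC l = l.flatMap pvG := by
  induction l with
  | nil => decide
  | cons c t ih =>
    have : (c :: t) = [c] ++ t := rfl
    rw [this, pvC_append, pvC_single, ih, List.flatMap_append]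
    simp

-- A's accumulator loop is the flatMap of the per-character expansion
theorem pvA_fold (l acc : List Char) :
    l.foldl (fun temp x =>
        let temp := temp ++ [x]
        if x ∈ (['a','e','i','o','u'] : List Char) then (temp ++ ['p']) ++ [x] else temp) acc
      = acc ++ l.flatMap pvG := by
  induction l generalizing acc with
  | nil => simp
  | cons c t ih =>
    simp only [List.foldl_cons, List.flatMap_cons, ih, pvG]
    split_ifs <;> simp

theorem pvB_toList (s : String) : (jerigonzo_alt s).toList = pvC s.toList := by
  unfold jerigonzo_alt pvC
  rw [show ("aeiou".toList) = ['a','e','i','o','u'] from rfl]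
  simp only [List.foldl_cons, List.foldl_nil]
  simp only [PySem.Str.toList_replace, String.toList_append, String.toList_ofList]
  simp only [show ("p".toList : List Char) = ['p'] from rfl, List.cons_append, List.nil_append]
  rw [pv_replace_single, pv_replace_single, pv_replace_single, pv_replace_single, pv_replace_single]

-- ===== VERDICT (by name: the statement is the Claim_ definition above) =====
theorem jerigonzo_spec : Claim_equal_jerigonzo := by
  intro s _
  unfold Spec_jerigonzo
  rw [← String.toList_inj, pvB_toList, pvC_eq]
  show (String.ofList (s.toList.foldl (fun temp x =>
      let temp := temp ++ [x]
      if x ∈ (['a','e','i','o','u'] : List Char) then (temp ++ ['p']) ++ [x] else temp) [])).toList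
    = List.flatMap pvG s.toList
  rw [String.toList_ofList, pvA_fold]
  simp
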